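-- pv_equiv track=rewrite | github.com/Gsopel/Edx | Dics count vowels.py | diction
-- ===== SOURCE A (Python) =====
-- def diction(some_string):
--     dictionary = {}
--     some_string1 = some_string.replace(" ", "")
--     some_string2 = some_string1.lower()
--     vowels = 'aeiou'
--     for char in vowels:
--         if char in some_string2:
--             dictionary[char] = some_string2.count(char)
--     return dictionary
-- ===== SOURCE B (Python) =====
-- def diction(some_string):
--     counts = {}
--     for ch in some_string.lower():
--         if ch in 'aeiou':
--             counts[ch] = counts.get(ch, 0) + 1
--     return {v: counts[v] for v in 'aeiou' if v in counts}
-- ===== Notes on version B (the rewrite author's own statement) =====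
-- stated objective: simpler
-- what changed: Replaces A's space-removal pass plus five separate membership+count scans over the string (one per vowel) with a single forward pass that builds a vowel-frequency dict directly, then emits it in the fixed vowel order.
import Mathlib
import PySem

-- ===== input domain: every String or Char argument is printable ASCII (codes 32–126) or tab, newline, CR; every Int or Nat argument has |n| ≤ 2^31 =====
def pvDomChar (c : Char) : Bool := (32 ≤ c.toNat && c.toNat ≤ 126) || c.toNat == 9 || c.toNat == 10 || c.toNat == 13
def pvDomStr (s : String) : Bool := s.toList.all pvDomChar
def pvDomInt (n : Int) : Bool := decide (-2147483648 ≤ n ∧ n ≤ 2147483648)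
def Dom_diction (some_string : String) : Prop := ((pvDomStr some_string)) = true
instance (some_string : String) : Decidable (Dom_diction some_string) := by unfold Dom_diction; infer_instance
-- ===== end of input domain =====

-- B replaces A's space-removal pass plus five membership+count scans (one per vowel)
-- with a single forward pass building the vowel-frequency dict, emitted in 'aeiou' order.
-- Equivalence of the RETURN value is proved on the whole domain.

-- ===== PORT A =====
def diction (some_string : String) : List (String × Int) :=
  let dictionary : PySem.Dict String Int := PySem.Dict.empty
  let some_string1 := PySem.Str.replace some_string " " ""
  let some_string2 := PySem.Str.lower some_string1
  let vowels := "aeiou"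
  (vowels.toList.foldl (fun d char =>
      if PySem.Str.isIn (String.ofList [char]) some_string2 then
        d.insert (String.ofList [char]) ((PySem.Str.count some_string2 (String.ofList [char]) : Int))
      else d) dictionary).items

-- ===== PORT B =====
def diction_alt (some_string : String) : List (String × Int) :=
  let counts : PySem.Dict String Int :=
    (PySem.Str.lower some_string).toList.foldl (fun d ch =>
      if PySem.Str.isIn (String.ofList [ch]) "aeiou" then
        d.insert (String.ofList [ch]) (d.getD (String.ofList [ch]) 0 + 1)
      else d) PySem.Dict.empty
  ("aeiou".toList.foldl (fun r v =>
      if counts.contains (String.ofList [v]) then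
        r.insert (String.ofList [v]) (counts.getD (String.ofList [v]) 0)
      else r) PySem.Dict.empty).items

-- ===== PRECONDITION & SPEC =====
def Spec_diction (some_string : String) (out : List (String × Int)) : Prop := out = diction_alt some_string
instance (some_string : String) (out : List (String × Int)) : Decidable (Spec_diction some_string out) := by unfold Spec_diction; infer_instance

-- ===== CLAIM (what is proved, stated in full; the proofs are below) =====
def Claim_equal_diction : Prop := ∀ (some_string : String), Dom_diction some_string → Spec_diction some_string (diction some_string)

-- ===== LEMMAS AND PROOFS =====

-- counting a single-character substring is counting the character
lemma count_go_singleton (c : Char) : ∀ (fuel : Nat) (l : List Char) (acc : Nat),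
    l.length ≤ fuel → PySem.Chars.count.go [c] fuel l acc = acc + l.count c := by
  intro fuel
  induction fuel with
  | zero => intro l acc h; cases l with
      | nil => simp [PySem.Chars.count.go]
      | cons x t => simp at h
  | succ n ih =>
      intro l acc h
      cases l with
      | nil => simp [PySem.Chars.count.go]
      | cons x t =>
        simp only [PySem.Chars.count.go]
        by_cases hx : x = c
        · subst hx
          simp only [List.isPrefixOf, BEq.rfl, Bool.true_and, if_pos, List.length_singleton,
            List.drop_succ_cons, List.drop_zero]
          rw [ih t (acc + 1) (by simpa using Nat.le_of_succ_le_succ h)]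
          simp
          omega
        · have : [c].isPrefixOf (x :: t) = false := by
            simp [List.isPrefixOf]
            exact fun hh => (hx hh.symm).elim
          rw [this]
          simp only [Bool.false_eq_true, if_false]
          rw [ih t acc (by simpa using Nat.le_of_succ_le_succ h)]
          simp [hx]

lemma count_singleton (l : List Char) (c : Char) : PySem.Chars.count l [c] = l.count c := by
  unfold PySem.Chars.count
  simp only [List.isEmpty_cons, Bool.false_eq_true, if_false]
  simpa using count_go_singleton c l.length l 0 (le_refl _)

-- replacing a single character by the empty string is filtering it out
lemma replace_go_singleton (x : Char) : ∀ (fuel : Nat) (l acc : List Char),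
    l.length ≤ fuel →
    PySem.Chars.replace.go [x] [] fuel l acc = acc.reverse ++ l.filter (fun c => c != x) := by
  intro fuel
  induction fuel with
  | zero => intro l acc h; cases l with
      | nil => simp [PySem.Chars.replace.go]
      | cons c t => simp at h
  | succ n ih =>
      intro l acc h
      cases l with
      | nil => simp [PySem.Chars.replace.go]
      | cons c t =>
        simp only [PySem.Chars.replace.go]
        by_cases hc : c = x
        · subst hc
          simp only [List.isPrefixOf, BEq.rfl, Bool.true_and, if_pos, List.length_singleton,
            List.drop_succ_cons, List.drop_zero, List.reverse_nil,
            List.nil_append]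
          rw [ih t acc (by simpa using Nat.le_of_succ_le_succ h)]
          simp
        · have : [x].isPrefixOf (c :: t) = false := by
            simp [List.isPrefixOf]
            exact fun hh => (hc hh.symm).elim
          rw [this]
          simp only [Bool.false_eq_true, if_false]
          rw [ih t (c :: acc) (by simpa using Nat.le_of_succ_le_succ h)]
          simp [hc]

lemma replace_singleton_empty (l : List Char) (x : Char) :
    PySem.Chars.replace l [x] [] = l.filter (fun c => c != x) := by
  unfold PySem.Chars.replace
  simp only [List.isEmpty_cons, Bool.false_eq_true, if_false]
  simpa using replace_go_singleton x l.length l [] (le_refl _)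

-- single-char count of v in the lowered, space-stripped string = count of v in the lowered string
lemma count_lower_filter (l : List Char) (v : Char) (hv : v ≠ ' ') :
    ((l.filter (fun c => c != ' ')).map PySem.Chars.lowerChar).count v
      = (l.map PySem.Chars.lowerChar).count v := by
  simp only [List.count_eq_countP, List.countP_map]
  rw [List.countP_filter]
  congr 1
  funext c
  by_cases hc : c = ' '
  · subst hc
    have hl : PySem.Chars.lowerChar ' ' = ' ' := by decide
    simp [Function.comp, hl]
    exact fun h => hv h.symm
  · simp [Function.comp, hc]

lemma ofList_singleton_inj : Function.Injective (fun c : Char => String.ofList [c]) := by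
  intro a b h
  simpa using congrArg String.toList h

-- the space-stripped lowered string has the same v-count as the lowered string (v ≠ ' ')
lemma s2_count (s : String) (v : Char) (hv : v ≠ ' ') :
    (PySem.Str.lower (PySem.Str.replace s " " "")).toList.count v
      = (PySem.Str.lower s).toList.count v := by
  simp only [PySem.Str.toList_lower, PySem.Str.toList_replace]
  rw [show (" ").toList = [' '] from rfl, show ("").toList = ([] : List Char) from rfl,
    replace_singleton_empty]
  unfold PySem.Chars.lower
  exact count_lower_filter s.toList v hv

lemma vowel_count_eq (s : String) (v : Char) (hv : v ≠ ' ') :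
    PySem.Str.count (PySem.Str.lower (PySem.Str.replace s " " "")) (String.ofList [v])
      = ((PySem.Str.lower s).toList.count v) := by
  rw [PySem.Str.count_eq]
  simp only [String.toList_ofList]
  rw [count_singleton]
  exact s2_count s v hv

-- 'v in t' for a single character is list membership
lemma isIn_singleton (v : Char) (l : List Char) : PySem.Chars.isIn [v] l = decide (v ∈ l) := by
  by_cases h : v ∈ l
  · rw [decide_eq_true h]
    exact (PySem.Chars.isIn_iff_infix [v] l).mpr ((List.singleton_infix_iff v l).mpr h)
  · rw [decide_eq_false h, PySem.Chars.isIn_eq_false_iff]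
    exact fun hi => h ((List.singleton_infix_iff v l).mp hi)

lemma vowel_mem_eq (s : String) (v : Char) (hv : v ≠ ' ') :
    PySem.Str.isIn (String.ofList [v]) (PySem.Str.lower (PySem.Str.replace s " " ""))
      = decide (v ∈ (PySem.Str.lower s).toList) := by
  rw [PySem.Str.isIn_eq]
  simp only [String.toList_ofList]
  rw [isIn_singleton, decide_eq_decide]
  rw [← List.count_pos_iff, ← List.count_pos_iff, s2_count s v hv]

-- B's counter equals the counter of the lowered vowel characters (as single-char strings)
lemma counts_eq_counter (s : String) :
    ((PySem.Str.lower s).toList.foldl (fun d ch =>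
        if PySem.Str.isIn (String.ofList [ch]) "aeiou" then
          d.insert (String.ofList [ch]) (d.getD (String.ofList [ch]) 0 + 1)
        else d) PySem.Dict.empty)
      = PySem.Dict.counter
          (((PySem.Str.lower s).toList.filter
              (fun ch => PySem.Str.isIn (String.ofList [ch]) "aeiou")).map
            (fun ch => String.ofList [ch])) := by
  rw [← PySem.Dict.foldl_insert_getD_add_one_eq_counter, List.foldl_map, List.foldl_filter]

lemma counter_contains_vowel (s : String) (v : Char)
    (hvv : PySem.Str.isIn (String.ofList [v]) "aeiou" = true) :
    (PySem.Dict.counter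
        (((PySem.Str.lower s).toList.filter
            (fun ch => PySem.Str.isIn (String.ofList [ch]) "aeiou")).map
          (fun ch => String.ofList [ch]))).contains (String.ofList [v])
      = decide (v ∈ (PySem.Str.lower s).toList) := by
  rw [PySem.Dict.contains_counter, List.contains_eq_mem, decide_eq_decide]
  constructor
  · intro hm
    rcases List.mem_map.mp hm with ⟨c, hc, hkey⟩
    rw [← ofList_singleton_inj hkey]
    exact (List.mem_filter.mp hc).1
  · intro hm
    exact List.mem_map.mpr ⟨v, List.mem_filter.mpr ⟨hm, hvv⟩, rfl⟩

lemma counter_getD_vowel (s : String) (v : Char)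
    (hvv : PySem.Str.isIn (String.ofList [v]) "aeiou" = true) :
    (PySem.Dict.counter
        (((PySem.Str.lower s).toList.filter
            (fun ch => PySem.Str.isIn (String.ofList [ch]) "aeiou")).map
          (fun ch => String.ofList [ch]))).getD (String.ofList [v]) 0
      = ((PySem.Str.lower s).toList.count v : Int) := by
  rw [← PySem.Dict.foldl_insert_getD_add_one_eq_counter, PySem.Dict.getD_foldl_insert_add_one,
    List.count_map_of_injective _ _ ofList_singleton_inj, List.count_filter
      (p := fun ch => PySem.Str.isIn (String.ofList [ch]) "aeiou") hvv]
  simp [PySem.Dict.getD, PySem.Dict.get?, PySem.Dict.empty]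

-- ===== VERDICT (by name: the statement is the Claim_ definition above) =====
theorem diction_spec : Claim_equal_diction := by
  intro s _
  unfold Spec_diction diction diction_alt
  dsimp only
  rw [counts_eq_counter]
  refine congrArg PySem.Dict.items ?_
  apply PySem.List.foldl_congr_mem
  intro d v hvmem
  rw [show ("aeiou").toList = ['a','e','i','o','u'] from rfl] at hvmem
  simp only [List.mem_cons, List.not_mem_nil, or_false] at hvmem
  have hv : v ≠ ' ' := by rcases hvmem with rfl|rfl|rfl|rfl|rfl <;> decide
  have hvv : PySem.Str.isIn (String.ofList [v]) "aeiou" = true := by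
    rcases hvmem with rfl|rfl|rfl|rfl|rfl <;> decide
  rw [vowel_mem_eq s v hv, vowel_count_eq s v hv,
    counter_contains_vowel s v hvv, counter_getD_vowel s v hvv]
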